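-- pv_equiv track=rewrite | github.com/Nix41/InGame | web/Stage2.py | gen_reuisitos
-- ===== SOURCE A (Python) =====
-- def gen_reuisitos(gameurl):
--     i = 0
--     for k in range(len(gameurl)):
--         if gameurl[k] == '/':
--             i = i + 1
--             if(i == 3):
--                 req = gameurl[:k] + '/juegos/requisitos' + gameurl[k:]
--                 return req
-- ===== SOURCE B (Python) =====
-- def gen_reuisitos(gameurl):
--     parts = gameurl.split('/', 3)
--     if len(parts) < 4:
--         return None
--     return '/'.join(parts[:3]) + '/juegos/requisitos/' + parts[3]
-- ===== Notes on version B (the rewrite author's own statement) =====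
-- stated objective: idiomatic
-- what changed: Replaces the char-by-char slash-counting loop with slicing at the hit by str.split('/', 3) tokenization and reassembly via join.
import Mathlib
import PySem

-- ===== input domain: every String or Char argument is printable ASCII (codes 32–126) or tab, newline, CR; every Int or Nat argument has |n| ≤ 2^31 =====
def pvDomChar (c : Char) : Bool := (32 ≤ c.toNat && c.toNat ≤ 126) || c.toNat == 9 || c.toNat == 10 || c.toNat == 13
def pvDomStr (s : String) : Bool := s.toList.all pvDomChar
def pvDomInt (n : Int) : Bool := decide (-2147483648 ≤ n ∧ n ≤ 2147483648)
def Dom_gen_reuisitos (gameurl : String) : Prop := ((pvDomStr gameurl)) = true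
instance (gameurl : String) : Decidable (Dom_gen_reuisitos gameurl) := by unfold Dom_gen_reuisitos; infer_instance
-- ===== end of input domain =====

-- B replaces A's char-by-char slash-counting scan with split('/', 3) tokenization and
-- reassembly (objective: idiomatic; same O(n) cost).

-- ===== PORT A =====
-- literal port of A's index loop: k over range(len), count '/' in i, return the
-- spliced string at the third slash, implicit None when the loop falls through
def gen_reuisitos_go (cs : List Char) (k : Nat) (i : Int) : Option String :=
  if h : k < cs.length then
    if cs[k] = '/' then
      let i' := i + 1
      if i' = 3 then
        some (String.ofList (PySem.Chars.slice cs none (some (k : Int)) ++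
          "/juegos/requisitos".toList ++ PySem.Chars.slice cs (some (k : Int)) none))
      else gen_reuisitos_go cs (k + 1) i'
    else gen_reuisitos_go cs (k + 1) i
  else none
termination_by cs.length - k

def gen_reuisitos (gameurl : String) : Option String :=
  gen_reuisitos_go gameurl.toList 0 0

-- ===== PORT B =====
def gen_reuisitos_alt (gameurl : String) : Option String :=
  match PySem.Str.splitMax? gameurl "/" 3 with
  | none => none   -- unreachable: the separator "/" is nonempty
  | some parts =>
      if parts.length < 4 then none
      else
        match PySem.List.pyGet? parts 3 with
        | none => none   -- unreachable: parts.length ≥ 4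
        | some p3 =>
            some (PySem.Str.join "/" (PySem.List.slice parts none (some 3)) ++
                  "/juegos/requisitos/" ++ p3)

-- ===== PRECONDITION & SPEC =====
def Spec_gen_reuisitos (gameurl : String) (out : Option String) : Prop := out = gen_reuisitos_alt gameurl
instance (gameurl : String) (out : Option String) : Decidable (Spec_gen_reuisitos gameurl out) := by unfold Spec_gen_reuisitos; infer_instance

-- ===== CLAIM (what is proved, stated in full; the proofs are below) =====
def Claim_equal_gen_reuisitos : Prop := ∀ (gameurl : String), Dom_gen_reuisitos gameurl → Spec_gen_reuisitos gameurl (gen_reuisitos gameurl)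

-- ===== LEMMAS AND PROOFS =====

def pvIns : List Char := "/juegos/requisitos".toList

-- reference scan (A's loop on the suffix, carrying the consumed prefix)
def pvScan (pre : List Char) (l : List Char) (i : Int) : Option (List Char) :=
  match l with
  | [] => none
  | c :: rest =>
      if c = '/' then
        if i + 1 = 3 then some (pre ++ pvIns ++ c :: rest)
        else pvScan (pre ++ [c]) rest (i + 1)
      else pvScan (pre ++ [c]) rest i

-- reference split on '/' with at most m splits: (head piece, later pieces)
def pvSplit : Nat → List Char → List Char × List (List Char)
  | 0, l => (l, [])
  | _ + 1, [] => ([], [])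
  | m + 1, c :: rest =>
      if c = '/' then
        let p := pvSplit m rest
        ([], p.1 :: p.2)
      else
        let p := pvSplit (m + 1) rest
        (c :: p.1, p.2)

-- B's final value expressed on pvSplit output
def pvBval (pre : List Char) (m : Nat) (p : List Char × List (List Char)) : Option (List Char) :=
  if p.2.length < m then none
  else some (pre ++ PySem.Chars.join ['/'] (List.take m (p.1 :: p.2)) ++ pvIns ++ '/' :: (p.1 :: p.2).getLastD [])

theorem pvSplit_snd_len : ∀ (m : Nat) (l : List Char), (pvSplit m l).2.length ≤ m := by
  intro m l
  induction l generalizing m with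
  | nil => cases m <;> simp [pvSplit]
  | cons c rest ih =>
      cases m with
      | zero => simp [pvSplit]
      | succ m =>
          by_cases hc : c = '/'
          · simpa [pvSplit, hc] using ih m
          · simpa [pvSplit, hc] using ih (m + 1)

theorem go_eq_pvSplit : ∀ (fuel m : Nat) (l cur : List Char) (acc : List (List Char)),
    l.length < fuel →
    PySem.Chars.splitOnMax.go ['/'] fuel m l cur acc =
      acc.reverse ++ ((cur.reverse ++ (pvSplit m l).1) :: (pvSplit m l).2) := by
  intro fuel
  induction fuel with
  | zero => intro m l cur acc h; omega
  | succ fuel ih =>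
      intro m l cur acc h
      cases m with
      | zero =>
          cases l <;> simp [PySem.Chars.splitOnMax.go, pvSplit]
      | succ m =>
          cases l with
          | nil => simp [PySem.Chars.splitOnMax.go, pvSplit]
          | cons c rest =>
              by_cases hc : c = '/'
              · rw [show PySem.Chars.splitOnMax.go ['/'] (fuel+1) (m+1) (c::rest) cur acc
                    = PySem.Chars.splitOnMax.go ['/'] fuel (m+1-1) (List.drop 1 (c::rest)) [] (cur.reverse :: acc) by
                      simp [PySem.Chars.splitOnMax.go, hc, List.isPrefixOf]]
                simp only [List.drop_one, List.tail_cons, Nat.add_sub_cancel]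
                rw [ih m rest [] (cur.reverse :: acc) (by simpa using Nat.lt_of_succ_lt_succ h)]
                simp [pvSplit, hc]
              · rw [show PySem.Chars.splitOnMax.go ['/'] (fuel+1) (m+1) (c::rest) cur acc
                    = PySem.Chars.splitOnMax.go ['/'] fuel (m+1) rest (c :: cur) acc by
                      simp [PySem.Chars.splitOnMax.go, hc, List.isPrefixOf]
                      intro h'; exact absurd h'.symm hc]
                rw [ih (m+1) rest (c :: cur) acc (by simpa using Nat.lt_of_succ_lt_succ h)]
                simp [pvSplit, hc]

theorem pvScan_slash (pre rest : List Char) (i : Int) :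
    pvScan pre ('/' :: rest) i =
      if i + 1 = 3 then some (pre ++ pvIns ++ '/' :: rest)
      else pvScan (pre ++ ['/']) rest (i + 1) := by
  simp [pvScan]

theorem pvScan_other (pre : List Char) (c : Char) (rest : List Char) (i : Int) (hc : c ≠ '/') :
    pvScan pre (c :: rest) i = pvScan (pre ++ [c]) rest i := by
  simp [pvScan, hc]

theorem pvSplit_slash (m : Nat) (rest : List Char) :
    pvSplit (m + 1) ('/' :: rest) = ([], (pvSplit m rest).1 :: (pvSplit m rest).2) := by
  simp [pvSplit]

theorem pvSplit_other (m : Nat) (c : Char) (rest : List Char) (hc : c ≠ '/') :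
    pvSplit (m + 1) (c :: rest) = (c :: (pvSplit (m + 1) rest).1, (pvSplit (m + 1) rest).2) := by
  simp [pvSplit, hc]

theorem pvJoin2 (a b : List Char) (L : List (List Char)) :
    PySem.Chars.join ['/'] (a :: b :: L) = a ++ '/' :: PySem.Chars.join ['/'] (b :: L) := by
  simp [PySem.Chars.join, List.intercalate, List.intersperse]

theorem pvJoinc (ch : Char) (a : List Char) (L : List (List Char)) :
    PySem.Chars.join ['/'] ((ch :: a) :: L) = ch :: PySem.Chars.join ['/'] (a :: L) := by
  cases L with
  | nil => simp [PySem.Chars.join, List.intercalate, List.intersperse]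
  | cons b L => rw [pvJoin2, pvJoin2]; simp

theorem scan_eq_split : ∀ (l : List Char) (m : Nat) (pre : List Char), 1 ≤ m → m ≤ 3 →
    pvScan pre l (3 - (m : Int)) = pvBval pre m (pvSplit m l) := by
  intro l
  induction l with
  | nil =>
      intro m pre h1 h3
      cases m with
      | zero => omega
      | succ m => simp [pvScan, pvSplit, pvBval]
  | cons c rest ih =>
      intro m pre h1 h3
      by_cases hc : c = '/'
      · subst hc
        cases m with
        | zero => omega
        | succ m =>
            cases m with
            | zero =>
                rw [pvScan_slash, if_pos (by norm_num), pvSplit_slash]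
                simp [pvSplit, pvBval, PySem.Chars.join, List.intercalate, List.intersperse]
            | succ m =>
                have hne : (3 : Int) - (↑(m + 2)) + 1 ≠ 3 := by push_cast; omega
                have hstep : (3 : Int) - (↑(m + 2)) + 1 = 3 - (↑(m + 1)) := by push_cast; ring
                rw [pvScan_slash, if_neg hne, hstep, ih (m + 1) (pre ++ ['/']) (by omega) (by omega)]
                rw [pvSplit_slash]
                rcases hsp : pvSplit (m + 1) rest with ⟨h', t'⟩
                simp only [pvBval]
                by_cases hlen : t'.length < m + 1
                · rw [if_pos hlen, if_pos (by simpa using Nat.succ_lt_succ hlen)]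
                · rw [if_neg hlen, if_neg (by simp; omega)]
                  simp only [Nat.add_sub_cancel, List.take_succ_cons, pvJoin2, List.getLastD_cons]
                  simp
      · cases m with
        | zero => omega
        | succ m =>
            rw [pvScan_other pre c rest _ hc, ih (m + 1) (pre ++ [c]) h1 h3]
            rw [pvSplit_other m c rest hc]
            rcases hsp : pvSplit (m + 1) rest with ⟨h', t'⟩
            simp only [pvBval]
            by_cases hlen : t'.length < m + 1
            · rw [if_pos hlen, if_pos hlen]
            · rw [if_neg hlen, if_neg hlen]
              have ht' : t' ≠ [] := by intro he; subst he; simp at hlen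
              rw [List.take_succ_cons, List.take_succ_cons, pvJoinc]
              rcases t' with _ | ⟨y, ys⟩
              · exact absurd rfl ht'
              · simp [List.getLast?_cons_cons, List.getLastD_cons]

theorem goA_hit (cs : List Char) (k : Nat) (i : Int) (hk : k < cs.length)
    (hc : cs[k] = '/') (hi : i + 1 = 3) :
    gen_reuisitos_go cs k i = some (String.ofList (PySem.Chars.slice cs none (some (k : Int)) ++
      "/juegos/requisitos".toList ++ PySem.Chars.slice cs (some (k : Int)) none)) := by
  rw [gen_reuisitos_go]; simp [hk, hc, hi]

theorem goA_step_slash (cs : List Char) (k : Nat) (i : Int) (hk : k < cs.length)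
    (hc : cs[k] = '/') (hi : i + 1 ≠ 3) :
    gen_reuisitos_go cs k i = gen_reuisitos_go cs (k + 1) (i + 1) := by
  rw [gen_reuisitos_go]; simp [hk, hc, hi]

theorem goA_step_other (cs : List Char) (k : Nat) (i : Int) (hk : k < cs.length)
    (hc : ¬ cs[k] = '/') :
    gen_reuisitos_go cs k i = gen_reuisitos_go cs (k + 1) i := by
  rw [gen_reuisitos_go]; simp [hk, hc]

theorem goA_eq_scan : ∀ (n : Nat) (cs : List Char) (k : Nat) (i : Int), n = cs.length - k →
    gen_reuisitos_go cs k i = Option.map String.ofList (pvScan (cs.take k) (cs.drop k) i) := by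
  intro n
  induction n with
  | zero =>
      intro cs k i hn
      have hk : ¬ k < cs.length := by omega
      rw [gen_reuisitos_go]
      simp [hk, List.drop_eq_nil_of_le (by omega : cs.length ≤ k), pvScan]
  | succ n ih =>
      intro cs k i hn
      have hk : k < cs.length := by omega
      have hdrop : cs.drop k = cs[k] :: cs.drop (k + 1) := List.drop_eq_getElem_cons hk
      have htake : cs.take (k + 1) = cs.take k ++ [cs[k]] := by
        rw [List.take_succ, List.getElem?_eq_getElem hk]; rfl
      by_cases hc : cs[k] = '/'
      · have hdrop' : cs.drop k = '/' :: cs.drop (k + 1) := by rw [hdrop, hc]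
        have htake' : cs.take (k + 1) = cs.take k ++ ['/'] := by rw [htake, hc]
        by_cases hi : i + 1 = 3
        · rw [goA_hit cs k i hk hc hi, hdrop', pvScan_slash, if_pos hi]
          simp [PySem.Chars.slice_eq_listSlice, PySem.List.slice_to_natCast,
            PySem.List.slice_from_natCast, pvIns, hdrop']
        · rw [goA_step_slash cs k i hk hc hi, ih cs (k + 1) (i + 1) (by omega),
            htake', hdrop', pvScan_slash, if_neg hi]
      · rw [goA_step_other cs k i hk hc, ih cs (k + 1) i (by omega),
          htake, hdrop, pvScan_other _ _ _ _ hc]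

-- ===== VERDICT (by name: the statement is the Claim_ definition above) =====
theorem gen_reuisitos_spec : Claim_equal_gen_reuisitos := by
  intro gameurl _
  unfold Spec_gen_reuisitos
  unfold gen_reuisitos gen_reuisitos_alt
  rw [goA_eq_scan (gameurl.toList.length - 0) gameurl.toList 0 0 rfl]
  simp only [List.take_zero, List.drop_zero]
  have h30 : (0 : Int) = 3 - ((3 : Nat) : Int) := by norm_num
  rw [h30, scan_eq_split gameurl.toList 3 [] (by omega) (by omega)]
  rw [show PySem.Str.splitMax? gameurl "/" 3
      = Option.map (List.map String.ofList) (PySem.Chars.splitMax? gameurl.toList ['/'] 3) by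
        simp [PySem.Str.splitMax?]]
  rw [show PySem.Chars.splitMax? gameurl.toList ['/'] 3
      = some (PySem.Chars.splitOnMax gameurl.toList ['/'] 3) by simp [PySem.Chars.splitMax?]]
  rw [show PySem.Chars.splitOnMax gameurl.toList ['/'] 3
      = PySem.Chars.splitOnMax.go ['/'] (gameurl.toList.length + 1) 3 gameurl.toList [] [] by
        simp [PySem.Chars.splitOnMax]]
  rw [go_eq_pvSplit (gameurl.toList.length + 1) 3 gameurl.toList [] [] (by omega)]
  rcases hsp : pvSplit 3 gameurl.toList with ⟨h, t⟩
  have htle : t.length ≤ 3 := by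
    have := pvSplit_snd_len 3 gameurl.toList
    rw [hsp] at this; exact this
  simp only [List.reverse_nil, List.nil_append, List.append_nil, Option.map_some]
  simp only [pvBval]
  by_cases hlen : t.length < 3
  · rw [if_pos hlen, if_pos (by simp; omega)]
    simp
  · have ht3 : t.length = 3 := le_antisymm htle (le_of_not_gt hlen)
    obtain ⟨t0, t1, t2, rfl⟩ := List.length_eq_three.mp ht3
    rw [if_neg hlen, if_neg (by simp)]
    rw [show PySem.List.pyGet? (List.map String.ofList [h, t0, t1, t2]) (3 : Int)
        = some (String.ofList t2) by simp [PySem.List.pyGet?, PySem.List.pyIdx?]]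
    rw [show (3 : Int) = ((3 : Nat) : Int) by norm_num, PySem.List.slice_to_natCast]
    refine congrArg some (String.toList_inj.mp ?_)
    simp [PySem.Str.join, PySem.Chars.join, List.intercalate, List.intersperse, pvIns]
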